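-- pv_equiv track=rewrite | github.com/SeryioGonzalez/arc_k8s_image_benchmarking | 8_analyze_rbac.py | classify_rule_verb_level
-- ===== SOURCE A (Python) =====
-- admin_verb_list = ['*']
--
-- write_verb_list = ['approve', 'create', 'delete', 'deletecollection', 'escalate', 'impersonate', 'patch', 'proxy', 'sign', 'update']
--
-- read_verb_list  = ['get', 'list', 'watch']
--
-- def classify_rule_verb_level (verb_list):
--     admin_verbs_in_list = [verb for verb in verb_list if verb in admin_verb_list]
--     write_verbs_in_list = [verb for verb in verb_list if verb in write_verb_list]
--     read_verbs_in_list  = [verb for verb in verb_list if verb in read_verb_list]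
--
--     if   len(admin_verbs_in_list) > 0:
--         return "admin_level"
--     elif len(write_verbs_in_list) > 0:
--         return "write_level"
--     elif len(read_verbs_in_list) > 0:
--         return "read_level"
-- ===== SOURCE B (Python) =====
-- admin_verb_list = ['*']
--
-- write_verb_list = ['approve', 'create', 'delete', 'deletecollection', 'escalate', 'impersonate', 'patch', 'proxy', 'sign', 'update']
--
-- read_verb_list  = ['get', 'list', 'watch']
--
-- def classify_rule_verb_level(verb_list):
--     has_admin = has_write = has_read = False
--     for verb in verb_list:
--         if verb in admin_verb_list:
--             has_admin = True
--         elif verb in write_verb_list: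
--             has_write = True
--         elif verb in read_verb_list:
--             has_read = True
--     if has_admin:
--         return "admin_level"
--     if has_write:
--         return "write_level"
--     if has_read:
--         return "read_level"
-- ===== Notes on version B (the rewrite author's own statement) =====
-- stated objective: simpler
-- what changed: Replaced A's three separate filtering passes (building three intermediate lists just to test emptiness) with one loop that accumulates three membership booleans and then applies the same precedence.
import Mathlib
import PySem

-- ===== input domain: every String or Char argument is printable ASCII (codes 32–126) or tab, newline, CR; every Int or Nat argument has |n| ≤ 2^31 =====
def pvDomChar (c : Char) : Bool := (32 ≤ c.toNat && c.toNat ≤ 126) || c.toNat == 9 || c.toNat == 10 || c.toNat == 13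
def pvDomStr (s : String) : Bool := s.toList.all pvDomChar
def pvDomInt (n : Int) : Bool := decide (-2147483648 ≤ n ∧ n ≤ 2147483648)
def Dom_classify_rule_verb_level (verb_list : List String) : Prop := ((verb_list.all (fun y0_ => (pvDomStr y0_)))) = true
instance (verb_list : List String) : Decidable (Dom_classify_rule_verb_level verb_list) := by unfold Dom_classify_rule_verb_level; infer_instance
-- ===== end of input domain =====

-- B replaces A's three filtering passes by one loop accumulating three membership booleans (objective: simpler).

-- ===== PORT A =====
def admin_verb_list : List String := ["*"]
def write_verb_list : List String := ["approve", "create", "delete", "deletecollection", "escalate", "impersonate", "patch", "proxy", "sign", "update"]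
def read_verb_list : List String := ["get", "list", "watch"]

def classify_rule_verb_level (verb_list : List String) : Option String :=
  let admin_verbs_in_list := verb_list.filter (fun verb => admin_verb_list.contains verb)
  let write_verbs_in_list := verb_list.filter (fun verb => write_verb_list.contains verb)
  let read_verbs_in_list := verb_list.filter (fun verb => read_verb_list.contains verb)
  if admin_verbs_in_list.length > 0 then some "admin_level"
  else if write_verbs_in_list.length > 0 then some "write_level"
  else if read_verbs_in_list.length > 0 then some "read_level"
  else none

-- ===== PORT B =====
def classifyLoop : List String → Bool × Bool × Bool → Bool × Bool × Bool
  | [], s => s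
  | verb :: rest, (ha, hw, hr) =>
    classifyLoop rest
      (if admin_verb_list.contains verb then (true, hw, hr)
       else if write_verb_list.contains verb then (ha, true, hr)
       else if read_verb_list.contains verb then (ha, hw, true)
       else (ha, hw, hr))

def classify_rule_verb_level_alt (verb_list : List String) : Option String :=
  match classifyLoop verb_list (false, false, false) with
  | (ha, hw, hr) =>
    if ha then some "admin_level"
    else if hw then some "write_level"
    else if hr then some "read_level"
    else none

-- ===== PRECONDITION & SPEC =====
def Spec_classify_rule_verb_level (verb_list : List String) (out : Option String) : Prop := out = classify_rule_verb_level_alt verb_list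
instance (verb_list : List String) (out : Option String) : Decidable (Spec_classify_rule_verb_level verb_list out) := by unfold Spec_classify_rule_verb_level; infer_instance

-- ===== CLAIM (what is proved, stated in full; the proofs are below) =====
def Claim_equal_classify_rule_verb_level : Prop := ∀ (verb_list : List String), Dom_classify_rule_verb_level verb_list → Spec_classify_rule_verb_level verb_list (classify_rule_verb_level verb_list)

-- ===== LEMMAS AND PROOFS =====

-- the three constant lists are pairwise disjoint, pointwise
lemma admin_write (v : String) : v ∈ admin_verb_list → v ∉ write_verb_list := by
  intro h
  simp [admin_verb_list] at h
  subst h; decide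

lemma admin_read (v : String) : v ∈ admin_verb_list → v ∉ read_verb_list := by
  intro h
  simp [admin_verb_list] at h
  subst h; decide

lemma write_read (v : String) : v ∈ write_verb_list → v ∉ read_verb_list := by
  intro h
  simp [write_verb_list] at h
  rcases h with h|h|h|h|h|h|h|h|h|h <;> subst h <;> decide

-- characterisation of B's loop
lemma classifyLoop_eq (l : List String) (ha hw hr : Bool) :
    classifyLoop l (ha, hw, hr) =
      (ha || l.any (fun v => admin_verb_list.contains v),
       hw || l.any (fun v => write_verb_list.contains v),
       hr || l.any (fun v => read_verb_list.contains v)) := by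
  induction l generalizing ha hw hr with
  | nil => simp [classifyLoop]
  | cons v rest ih =>
    simp only [classifyLoop, List.any_cons]
    by_cases h1 : v ∈ admin_verb_list
    · simp [h1, ih, admin_write v h1, admin_read v h1]
    · by_cases h2 : v ∈ write_verb_list
      · simp [h1, h2, ih, write_read v h2]
      · by_cases h3 : v ∈ read_verb_list
        · simp [h1, h2, h3, ih]
        · simp [h1, h2, h3, ih]

lemma filter_len_pos (p : String → Bool) (l : List String) :
    ((l.filter p).length > 0) = (l.any p = true) := by
  simp [List.length_pos_iff, List.eq_nil_iff_forall_not_mem, List.mem_filter, List.any_eq_true]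

-- ===== VERDICT (by name: the statement is the Claim_ definition above) =====
theorem classify_rule_verb_level_spec : Claim_equal_classify_rule_verb_level := by
  intro verb_list _
  unfold Spec_classify_rule_verb_level classify_rule_verb_level classify_rule_verb_level_alt
  rw [classifyLoop_eq]
  simp only [filter_len_pos, Bool.false_or]
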